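-- pv_equiv track=rewrite | github.com/KennthF/Unit-5---Lab-2 | main.py | count_consonant
-- ===== SOURCE A (Python) =====
-- def count_consonant(info):
--     # Count the consonant of a file
--     vowels = ["a","e","i","o","u"]
--     count_dict = {}
--     for char in info:
--         if char not in vowels:
--             value = count_dict.get(char) #Put the element to the key (The left side)
--
--             if value is None:  #Check if it is empty (Its right side)
--                 count_dict[char] = 1 #Add zero to it
--
--             else:
--                 count_dict[char] += 1 #if not empty plus 1
--     return count_dict
-- ===== SOURCE B (Python) =====
-- def count_consonant(info):
--     # Two-phase: count every character first, then prune vowel keys.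
--     counts = {}
--     for ch in info:
--         counts[ch] = counts.get(ch, 0) + 1
--     return {ch: n for ch, n in counts.items() if ch not in ("a", "e", "i", "o", "u")}
-- ===== Notes on version B (the rewrite author's own statement) =====
-- stated objective: faster
-- what changed: B counts every character in one unconditional tight pass and then prunes vowel keys from the finished table once, instead of A's per-character vowel membership test and get/None branch inside the loop.
import Mathlib
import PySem

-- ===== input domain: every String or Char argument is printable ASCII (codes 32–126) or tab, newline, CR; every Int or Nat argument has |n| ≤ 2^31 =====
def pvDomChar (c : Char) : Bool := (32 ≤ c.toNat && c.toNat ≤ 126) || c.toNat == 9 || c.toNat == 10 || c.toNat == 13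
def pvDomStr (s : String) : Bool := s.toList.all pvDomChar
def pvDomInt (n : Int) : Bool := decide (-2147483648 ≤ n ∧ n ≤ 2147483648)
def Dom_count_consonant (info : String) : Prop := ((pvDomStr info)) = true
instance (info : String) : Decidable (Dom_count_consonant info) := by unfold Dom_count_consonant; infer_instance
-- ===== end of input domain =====

-- B counts every character first and prunes vowel keys afterwards, instead of A's in-loop vowel guard; same O(n) cost.

-- ===== PORT A =====
def count_consonant (info : String) : List (String × Int) :=
  let vowels : List Char := ['a', 'e', 'i', 'o', 'u']
  let count_dict := info.toList.foldl
    (fun d char =>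
      if char ∉ vowels then
        match d.get? char with
        | none => d.insert char 1
        | some v => d.insert char (v + 1)
      else d)
    (PySem.Dict.empty : PySem.Dict Char Int)
  count_dict.items.map (fun p => (String.singleton p.1, p.2))

-- ===== PORT B =====
def count_consonant_alt (info : String) : List (String × Int) :=
  let counts := info.toList.foldl
    (fun d ch => d.insert ch (d.getD ch 0 + 1))
    (PySem.Dict.empty : PySem.Dict Char Int)
  (counts.items.filter (fun p => p.1 ∉ (['a', 'e', 'i', 'o', 'u'] : List Char))).map
    (fun p => (String.singleton p.1, p.2))

-- ===== PRECONDITION & SPEC =====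
def Spec_count_consonant (info : String) (out : List (String × Int)) : Prop := out = count_consonant_alt info
instance (info : String) (out : List (String × Int)) : Decidable (Spec_count_consonant info out) := by unfold Spec_count_consonant; infer_instance

-- ===== CLAIM (what is proved, stated in full; the proofs are below) =====
def Claim_equal_count_consonant : Prop := ∀ (info : String), Dom_count_consonant info → Spec_count_consonant info (count_consonant info)

-- ===== LEMMAS AND PROOFS =====

-- first-occurrence dedup commutes with filter
theorem pv_ofList_filter {α : Type} [DecidableEq α] (p : α → Bool) (xs : List α) :
    PySem.Set.ofList (xs.filter p) = (PySem.Set.ofList xs).filter p := by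
  induction xs using List.reverseRecOn with
  | nil => rfl
  | append_singleton ys x ih =>
    rw [List.filter_append, PySem.Set.ofList_append_singleton, PySem.Set.add_eq_ite]
    by_cases hp : p x = true
    · rw [show List.filter p [x] = [x] by simp [hp],
        PySem.Set.ofList_append_singleton, PySem.Set.add_eq_ite]
      by_cases hmem : x ∈ PySem.Set.ofList ys
      · have h2 : x ∈ PySem.Set.ofList (ys.filter p) := by
          rw [PySem.Set.mem_ofList]
          exact List.mem_filter.mpr ⟨by rwa [PySem.Set.mem_ofList] at hmem, hp⟩
        simp [hmem, ih, hp]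
      · have h2 : x ∉ PySem.Set.ofList (ys.filter p) := by
          rw [PySem.Set.mem_ofList]
          intro h
          apply hmem
          rw [PySem.Set.mem_ofList]
          exact (List.mem_filter.mp h).1
        simp [hmem, ih, List.filter_append, hp]
    · have hp' : p x = false := by simpa using hp
      rw [show List.filter p [x] = [] by simp [hp'], List.append_nil, ih]
      by_cases hmem : x ∈ PySem.Set.ofList ys
      · simp [hmem]
      · simp [hmem, List.filter_append, hp']

-- A's guarded loop body is the unconditional counting step
theorem pv_step_eq (d : PySem.Dict Char Int) (c : Char) :
    (match d.get? c with
     | none => d.insert c 1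
     | some v => d.insert c (v + 1)) = d.insert c (d.getD c 0 + 1) := by
  rcases h : d.get? c with _ | v <;>
    simp [PySem.Dict.getD_eq_get?_getD, h]

theorem count_consonant_eq (info : String) :
    count_consonant info = count_consonant_alt info := by
  unfold count_consonant count_consonant_alt
  dsimp only
  have hfun : (fun (d : PySem.Dict Char Int) char =>
      if char ∉ (['a','e','i','o','u'] : List Char) then
        match d.get? char with
        | none => d.insert char 1
        | some v => d.insert char (v + 1)
      else d)
      = (fun (d : PySem.Dict Char Int) c =>
          if decide (c ∉ (['a','e','i','o','u'] : List Char)) = true then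
            d.insert c (d.getD c 0 + 1) else d) := by
    funext d c
    by_cases h : c ∈ (['a','e','i','o','u'] : List Char) <;> simp [h, pv_step_eq]
  rw [hfun, ← List.foldl_filter, PySem.Dict.foldl_insert_getD_add_one_eq_counter,
    PySem.Dict.foldl_insert_getD_add_one_eq_counter,
    PySem.Dict.items_counter, PySem.Dict.items_counter, List.filter_map]
  rw [show ((fun (p : Char × Int) => decide (p.1 ∉ (['a','e','i','o','u'] : List Char))) ∘
      (fun k => (k, (info.toList.count k : Int))))
      = (fun c => decide (c ∉ (['a','e','i','o','u'] : List Char))) from rfl]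
  rw [← pv_ofList_filter]
  congr 1
  apply List.map_congr_left
  intro k hk
  have hqk : k ∉ (['a','e','i','o','u'] : List Char) := by
    have := (List.mem_filter.mp (by rwa [PySem.Set.mem_ofList] at hk)).2
    simpa using this
  have : List.count k (List.filter (fun c => decide (c ∉ (['a','e','i','o','u'] : List Char))) info.toList)
      = List.count k info.toList := List.count_filter (by simpa using hqk)
  rw [this]

-- ===== VERDICT (by name: the statement is the Claim_ definition above) =====
theorem count_consonant_spec : Claim_equal_count_consonant := by
  intro info _
  exact count_consonant_eq info
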